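-- pv_equiv track=rewrite | github.com/blossom22/11_Inflearn_Algorithm | 6_greedy_1.py | solution
-- ===== SOURCE A (Python) =====
-- def solution(weight, limit):
--     answer = 0
--     temp =0
--     n = len(weight)
--     weight.sort()
--     for i in range(n):
--         if temp+weight[i]<=limit:
--             temp += weight[i]
--             answer+=1
--     return answer
-- ===== SOURCE B (Python) =====
-- def solution(weight, limit):
--     weight.sort()
--     prefix = []
--     s = 0
--     for w in weight:
--         s += w
--         prefix.append(s)
--     for i, p in enumerate(prefix):
--         if p > limit:
--             return i
--     return len(prefix)
-- ===== Notes on version B (the rewrite author's own statement) =====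
-- stated objective: alternative
-- what changed: Replaces the greedy conditional accumulator-and-counter loop by building the full prefix-sum table of the sorted list and returning the first index whose prefix sum exceeds the limit (with early return), valid because on a sorted list the greedy check fails permanently after its first failure.
import Mathlib
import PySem

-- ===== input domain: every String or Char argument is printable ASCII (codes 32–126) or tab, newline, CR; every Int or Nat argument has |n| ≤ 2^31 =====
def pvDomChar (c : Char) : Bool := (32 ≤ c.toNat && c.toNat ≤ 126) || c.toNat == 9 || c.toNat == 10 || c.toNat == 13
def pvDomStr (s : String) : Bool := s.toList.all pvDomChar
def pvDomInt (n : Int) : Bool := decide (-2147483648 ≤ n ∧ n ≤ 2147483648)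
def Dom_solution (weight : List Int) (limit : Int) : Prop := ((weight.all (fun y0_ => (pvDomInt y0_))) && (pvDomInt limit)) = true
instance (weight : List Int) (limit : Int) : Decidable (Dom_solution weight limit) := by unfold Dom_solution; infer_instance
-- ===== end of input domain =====

-- B replaces A's conditional accumulator/counter loop by a prefix-sum table over the
-- sorted list plus a first-exceedance search (alternative decomposition, same cost).
-- Both Pythons sort `weight` in place; the equivalence proved is about the return value.

-- ===== PORT A =====
def solution (weight : List Int) (limit : Int) : Int :=
  let n : Int := weight.length
  let w := PySem.List.sorted weight (fun x => x) false
  let st := (PySem.List.pyRange 0 n 1).foldl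
      (fun (st : Int × Int) i =>
        if st.2 + PySem.List.pyGetD w i 0 ≤ limit then (st.1 + 1, st.2 + PySem.List.pyGetD w i 0)
        else st)
      (0, 0)
  st.1

-- ===== PORT B =====
-- the second loop of Source B: scan enumerate(prefix) and return the first index with p > limit
def bScan (limit : Int) (l : List (Int × Int)) (fallback : Int) : Int :=
  match l with
  | [] => fallback
  | (i, p) :: t => if p > limit then i else bScan limit t fallback

def solution_alt (weight : List Int) (limit : Int) : Int :=
  let w := PySem.List.sorted weight (fun x => x) false
  let pre := (w.foldl (fun (st : Int × List Int) x => (st.1 + x, st.2 ++ [st.1 + x])) (0, [])).2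
  bScan limit (PySem.List.enumerate pre 0) (pre.length : Int)

-- ===== PRECONDITION & SPEC =====
def Spec_solution (weight : List Int) (limit : Int) (out : Int) : Prop := out = solution_alt weight limit
instance (weight : List Int) (limit : Int) (out : Int) : Decidable (Spec_solution weight limit out) := by unfold Spec_solution; infer_instance

-- ===== CLAIM (what is proved, stated in full; the proofs are below) =====
def Claim_equal_solution : Prop := ∀ (weight : List Int) (limit : Int), Dom_solution weight limit → Spec_solution weight limit (solution weight limit)

-- ===== LEMMAS AND PROOFS =====

-- prefix sums starting from accumulator s
def preSums (s : Int) : List Int → List Int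
  | [] => []
  | x :: t => (s + x) :: preSums (s + x) t

-- relative first index with prefix sum > limit (or the length)
def firstOver (limit : Int) : List Int → Int
  | [] => 0
  | p :: t => if p > limit then 0 else 1 + firstOver limit t

theorem foldl_build_prefix (l : List Int) (s : Int) (acc : List Int) :
    (l.foldl (fun (st : Int × List Int) x => (st.1 + x, st.2 ++ [st.1 + x])) (s, acc)).2
      = acc ++ preSums s l := by
  induction l generalizing s acc with
  | nil => simp [preSums]
  | cons x t ih => simp [List.foldl, preSums, ih]

theorem bScan_enumerate (limit : Int) (l : List Int) (i : Int) :
    bScan limit (PySem.List.enumerate l i) (i + (l.length : Int)) = i + firstOver limit l := by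
  induction l generalizing i with
  | nil => simp [PySem.List.enumerate_nil, bScan, firstOver]
  | cons p t ih =>
      simp only [PySem.List.enumerate_cons, bScan, List.length_cons, firstOver]
      by_cases h : p > limit
      · simp [h]
      · simp only [if_neg h]
        have e : i + (((t.length + 1 : Nat)) : Int) = (i + 1) + (t.length : Int) := by
          push_cast; ring
        rw [e, ih (i + 1)]; ring

-- once the greedy check fails for every remaining element, the loop is the identity
theorem foldl_stuck (limit : Int) (l : List Int) (ans temp : Int)
    (h : ∀ y ∈ l, ¬ temp + y ≤ limit) :
    (l.foldl (fun (st : Int × Int) x => if st.2 + x ≤ limit then (st.1 + 1, st.2 + x) else st)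
      (ans, temp)) = (ans, temp) := by
  induction l with
  | nil => rfl
  | cons x t ih =>
      have hx := h x (by simp)
      simp [List.foldl, hx]
      exact ih (fun y hy => h y (by simp [hy]))

-- main invariant: on a sorted tail, A's counter advances by the first-exceedance index
theorem loop_eq_firstOver (limit : Int) (l : List Int) (ans temp : Int)
    (hs : l.Pairwise (· ≤ ·)) :
    (l.foldl (fun (st : Int × Int) x => if st.2 + x ≤ limit then (st.1 + 1, st.2 + x) else st)
      (ans, temp)).1 = ans + firstOver limit (preSums temp l) := by
  induction l generalizing ans temp with
  | nil => simp [preSums, firstOver]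
  | cons x t ih =>
      rcases List.pairwise_cons.mp hs with ⟨hx, ht⟩
      by_cases h : temp + x ≤ limit
      · have := ih (ans + 1) (temp + x) ht
        simp [List.foldl, preSums, firstOver, h, this]
        omega
      · have hstuck := foldl_stuck limit t ans temp
          (fun y hy hle => h (le_trans (by have := hx y hy; omega) hle))
        simp [List.foldl, preSums, firstOver, h, hstuck]

theorem solution_eq (weight : List Int) (limit : Int) :
    solution weight limit = solution_alt weight limit := by
  simp only [solution, solution_alt]
  have hlen : ((weight.length : Nat) : Int) = ((PySem.List.sorted weight (fun x => x) false).length : Int) := by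
    simp [PySem.List.length_sorted]
  rw [hlen,
      PySem.List.foldl_pyRange_zero_pyGetD' (PySem.List.sorted weight (fun x => x) false) 0
        (fun (st : Int × Int) x => if st.2 + x ≤ limit then (st.1 + 1, st.2 + x) else st) (0, 0),
      foldl_build_prefix, List.nil_append]
  have hb := bScan_enumerate limit (preSums 0 (PySem.List.sorted weight (fun x => x) false)) 0
  simp only [zero_add] at hb
  rw [hb, loop_eq_firstOver limit _ 0 0 (PySem.List.sorted_pairwise weight (fun x => x))]
  ring

-- ===== VERDICT (by name: the statement is the Claim_ definition above) =====
theorem solution_spec : Claim_equal_solution := by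
  intro weight limit _
  simpa [Spec_solution] using solution_eq weight limit
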